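-- pv_equiv track=rewrite | github.com/leehj24/Coding_Test | programmers/Level.0_py/등수매기기.py | solution
-- ===== SOURCE A (Python) =====
-- def solution(score):
--     result=[]
--     aver=[]
--     for i in score:
--         aver.append(sum(i)//2)
--     aver_Sort = sorted(aver,reverse=True)
--     for i in aver:
--         result.append(aver_Sort.index(i)+1)
--     return  result
-- ===== SOURCE B (Python) =====
-- def solution(score):
--     avgs = [sum(s) // 2 for s in score]
--     return [1 + sum(1 for w in avgs if w > v) for v in avgs]
-- ===== Notes on version B (the rewrite author's own statement) =====
-- stated objective: alternative
-- what changed: B drops the sort entirely: a student's rank is computed directly as 1 plus the number of half-sums strictly greater than theirs, instead of locating each value by scanning a descending-sorted copy with list.index.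
import Mathlib
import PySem

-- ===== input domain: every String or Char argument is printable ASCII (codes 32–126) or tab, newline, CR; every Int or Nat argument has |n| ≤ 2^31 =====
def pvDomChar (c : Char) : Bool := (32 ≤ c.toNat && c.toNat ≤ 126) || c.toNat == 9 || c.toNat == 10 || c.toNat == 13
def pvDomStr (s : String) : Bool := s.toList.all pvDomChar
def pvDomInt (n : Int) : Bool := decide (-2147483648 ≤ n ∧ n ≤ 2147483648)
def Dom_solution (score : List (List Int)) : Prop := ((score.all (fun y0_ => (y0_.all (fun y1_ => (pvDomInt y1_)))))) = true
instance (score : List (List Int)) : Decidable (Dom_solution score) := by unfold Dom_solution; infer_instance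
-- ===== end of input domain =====

-- B drops the sort: each rank is 1 + the count of strictly greater half-sums
-- (objective: alternative — a counting characterisation of the rank instead of sort+index).

-- ===== PORT A =====
-- literal port: aver built by append loop; rank = aver_Sort.index(i) + 1
-- (.index never raises here since i ∈ aver ⊆ aver_Sort; getD 0 is an unreachable default)
def solution (score : List (List Int)) : List Int :=
  let aver := score.foldl (fun acc i => acc ++ [PySem.Int.floordiv i.sum 2]) []
  let averSort := PySem.List.sorted aver (fun x => x) true
  aver.foldl (fun acc i =>
    acc ++ [(((PySem.List.index? averSort i).getD 0 : Nat) : Int) + 1]) []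

-- ===== PORT B =====
-- 'sum(1 for w in avgs if w > v)' is the count of strictly greater elements: List.countP
def solution_alt (score : List (List Int)) : List Int :=
  let avgs := score.map (fun s => PySem.Int.floordiv s.sum 2)
  avgs.map (fun v => 1 + ((avgs.countP (fun w => decide (v < w)) : Nat) : Int))

-- ===== PRECONDITION & SPEC =====
def Spec_solution (score : List (List Int)) (out : List Int) : Prop := out = solution_alt score
instance (score : List (List Int)) (out : List Int) : Decidable (Spec_solution score out) := by unfold Spec_solution; infer_instance

-- ===== CLAIM =====
def Claim_equal_solution : Prop := ∀ (score : List (List Int)), Dom_solution score → Spec_solution score (solution score)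

-- ===== LEMMAS AND PROOFS =====

-- In a descending-sorted list containing v, the first index of v equals
-- the number of elements strictly greater than v.
theorem idxOf_desc_eq_countP (l : List Int) (v : Int)
    (hs : l.Pairwise (fun a b => b ≤ a)) (hm : v ∈ l) :
    PySem.List.index? l v = some (l.countP (fun w => decide (v < w))) := by
  induction l with
  | nil => cases hm
  | cons x t ih =>
      rcases List.pairwise_cons.mp hs with ⟨hx, ht⟩
      by_cases hvx : v = x
      · subst hvx
        rw [PySem.List.index?_cons_self]
        have hc : t.countP (fun w => decide (v < w)) = 0 := by
          apply List.countP_eq_zero.mpr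
          intro w hw
          simpa using not_lt.mpr (hx w hw)
        simp [hc]
      · have hvt : v ∈ t := by
          rcases List.mem_cons.mp hm with h | h
          · exact absurd h hvx
          · exact h
        have hvltx : v < x := lt_of_le_of_ne (hx v hvt) hvx
        rw [PySem.List.index?_cons_of_ne _ (fun h => hvx h.symm), ih ht hvt]
        simp [hvltx, Nat.add_comm]

-- ===== VERDICT =====
theorem solution_spec : Claim_equal_solution := by
  intro score _
  show _ = _
  unfold solution solution_alt
  rw [PySem.List.foldl_append_singleton_eq_map, PySem.List.foldl_append_singleton_eq_map]
  simp only [List.nil_append]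
  apply List.map_congr_left
  intro v hv
  set avgs := score.map (fun s => PySem.Int.floordiv s.sum 2) with havgs
  set srt := PySem.List.sorted avgs (fun x => x) true with hsrt
  have hm : v ∈ srt := by rw [hsrt, PySem.List.mem_sorted]; exact hv
  have hs : srt.Pairwise (fun a b => b ≤ a) := by
    simpa using PySem.List.sorted_pairwise_rev avgs (fun x => x)
  rw [idxOf_desc_eq_countP srt v hs hm]
  have hperm : srt.Perm avgs := PySem.List.sorted_perm avgs (fun x => x) true
  rw [hperm.countP_eq]
  simp [Int.add_comm]
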